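-- pv_equiv track=rewrite | github.com/travisCxy/deblur | att_model_2.2/projects/sl/common.py | vec2code
-- ===== SOURCE A (Python) =====
-- DIGITS = ["0", "1", "2", "3", "4", "5", "6", "7", "8", "9",
--           "+", "-", "*", "/", "(", ")", "@", "!", "=", ".", ",", "、", "|",
--           "~", ":",
--           "时", "分", "秒", "钟", "小"]
--
-- def vec2code(vec):
--     code = ''
--     hw = False
--     for i in vec:
--         if i == -1:
--             break
--         if i >= len(DIGITS):
--             i -= len(DIGITS)
--             if not hw:
--                 hw = True
--                 code += "$"
--         elif hw:
--             hw = False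
--             code += "$"
--         code += DIGITS[i]
--     if hw:
--         code += "$"
--     return code
-- ===== SOURCE B (Python) =====
-- DIGITS = ["0", "1", "2", "3", "4", "5", "6", "7", "8", "9",
--           "+", "-", "*", "/", "(", ")", "@", "!", "=", ".", ",", "、", "|",
--           "~", ":",
--           "时", "分", "秒", "钟", "小"]
--
--
-- def _prefix(vec):
--     out = []
--     for x in vec:
--         if x == -1:
--             break
--         out.append(x)
--     return out
--
--
-- def vec2code(vec):
--     pre = _prefix(vec)
--     n = len(DIGITS)
--     parts = []
--     i = 0
--     while i < len(pre):
--         high = pre[i] >= n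
--         j = i
--         while j < len(pre) and (pre[j] >= n) == high:
--             j += 1
--         run = pre[i:j]
--         if high:
--             parts.append("$" + "".join(DIGITS[x - n] for x in run) + "$")
--         else:
--             parts.append("".join(DIGITS[x] for x in run))
--         i = j
--     return "".join(parts)
-- ===== Notes on version B (the rewrite author's own statement) =====
-- stated objective: simpler
-- what changed: B replaces A's stateful hw toggle with end-of-loop '$' fixup by collecting the prefix before the first -1 and emitting maximal same-key (x >= len(DIGITS)) runs, wrapping each high run in '$'...'$'.
import Mathlib
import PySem

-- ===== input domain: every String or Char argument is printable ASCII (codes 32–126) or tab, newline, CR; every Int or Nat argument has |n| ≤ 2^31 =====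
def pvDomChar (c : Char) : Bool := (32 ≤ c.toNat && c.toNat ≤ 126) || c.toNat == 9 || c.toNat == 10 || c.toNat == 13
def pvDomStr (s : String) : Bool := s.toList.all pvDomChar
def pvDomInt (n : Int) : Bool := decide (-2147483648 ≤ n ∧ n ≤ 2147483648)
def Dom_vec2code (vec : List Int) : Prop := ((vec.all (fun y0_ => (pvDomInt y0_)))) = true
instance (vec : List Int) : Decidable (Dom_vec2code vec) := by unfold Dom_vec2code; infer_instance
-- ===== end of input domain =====

-- B replaces A's stateful hw toggle and end-of-loop '$' fixup by run-based grouping of the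
-- pre-(-1) prefix (objective: simpler decomposition, same cost).

-- DIGITS: each entry is a one-character string; strings are handled on the List Char side.
def pvDIGITS : List Char :=
  ['0', '1', '2', '3', '4', '5', '6', '7', '8', '9',
   '+', '-', '*', '/', '(', ')', '@', '!', '=', '.', ',', '、', '|',
   '~', ':',
   '时', '分', '秒', '钟', '小']

-- DIGITS[i]  (Python raises outside [-30,30); Pre_ excludes that, the default is never used there)
def pvDigit (i : Int) : Char := (PySem.List.pyGet? pvDIGITS i).getD ' '

-- ===== PORT A =====
-- A's loop, step for step: hw flag, '$' toggling, break on -1, trailing '$' fixup.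
def vec2codeGo : List Int → Bool → List Char → List Char
  | [], hw, code => if hw then code ++ ['$'] else code
  | i :: rest, hw, code =>
    if i = -1 then (if hw then code ++ ['$'] else code)
    else if i ≥ 30 then
      let i' := i - 30
      let p := if !hw then (true, code ++ ['$']) else (hw, code)
      vec2codeGo rest p.1 (p.2 ++ [pvDigit i'])
    else
      let p := if hw then (false, code ++ ['$']) else (hw, code)
      vec2codeGo rest p.1 (p.2 ++ [pvDigit i])

def vec2code (vec : List Int) : String := String.mk (vec2codeGo vec false [])

-- ===== PORT B =====
-- B's prefix collector (loop with break on -1 = takeWhile)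
def pvPrefix (vec : List Int) : List Int := vec.takeWhile (fun x => x ≠ -1)

-- B's run loop: peel one maximal run (same high/low key) at a time.
def vec2codeRuns : List Int → List Char
  | [] => []
  | x :: xs =>
    let high := decide (x ≥ 30)
    let run := x :: xs.takeWhile (fun y => decide (y ≥ 30) == high)
    let rest := xs.dropWhile (fun y => decide (y ≥ 30) == high)
    (if high then '$' :: run.map (fun y => pvDigit (y - 30)) ++ ['$']
     else run.map pvDigit) ++ vec2codeRuns rest
termination_by l => l.length
decreasing_by
  exact Nat.lt_succ_of_le (xs.length_dropWhile_le _)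

def vec2code_alt (vec : List Int) : String := String.mk (vec2codeRuns (pvPrefix vec))

-- ===== PRECONDITION & SPEC =====
-- Pre_ excludes exactly the inputs where Python's DIGITS[...] raises IndexError
-- (both A and B raise there): an element before the first -1 outside [-30, 60).
def Pre_vec2code (vec : List Int) : Prop :=
  ∀ x ∈ vec.takeWhile (fun x => x ≠ -1), -30 ≤ x ∧ x < 60
instance (vec : List Int) : Decidable (Pre_vec2code vec) := by unfold Pre_vec2code; infer_instance

def pvWitness_vec2code : List Int := [3, 35, 41, 7, -1, 999]

def Spec_vec2code (vec : List Int) (out : String) : Prop := out = vec2code_alt vec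
instance (vec : List Int) (out : String) : Decidable (Spec_vec2code vec out) := by unfold Spec_vec2code; infer_instance

-- ===== CLAIM (what is proved, stated in full; the proofs are below) =====
def Claim_equal_vec2code : Prop := ∀ (vec : List Int), Dom_vec2code vec → Pre_vec2code vec → Spec_vec2code vec (vec2code vec)

-- ===== LEMMAS AND PROOFS =====

-- A's break-on-(-1) equals running the no-break loop on the pre-(-1) prefix.
theorem go_takeWhile (l : List Int) (hw : Bool) (code : List Char) :
    vec2codeGo l hw code = vec2codeGo (l.takeWhile (fun x => x ≠ -1)) hw code := by
  induction l generalizing hw code with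
  | nil => rfl
  | cons i rest ih =>
    by_cases h : i = -1
    · subst h; simp [vec2codeGo, List.takeWhile]
    · have ht : (i :: rest).takeWhile (fun x => x ≠ -1) = i :: rest.takeWhile (fun x => x ≠ -1) := by
        simp [h]
      rw [ht]
      simp only [vec2codeGo, if_neg h]
      split_ifs <;> exact ih _ _

-- the tail of B's run loop while inside a high run: rest of the run, closing '$', remaining runs
def runsH (l : List Int) : List Char :=
  (l.takeWhile (fun y => decide (y ≥ 30) == true)).map (fun y => pvDigit (y - 30))
    ++ '$' :: vec2codeRuns (l.dropWhile (fun y => decide (y ≥ 30) == true))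

theorem runs_fuse_low (l : List Int) :
    vec2codeRuns l = (l.takeWhile (fun y => decide (y ≥ 30) == false)).map pvDigit
      ++ vec2codeRuns (l.dropWhile (fun y => decide (y ≥ 30) == false)) := by
  cases l with
  | nil => rfl
  | cons j tl =>
    by_cases hj : j ≥ 30
    · rw [List.takeWhile_cons_of_neg (by simp [hj]), List.dropWhile_cons_of_neg (by simp [hj])]
      rfl
    · rw [List.takeWhile_cons_of_pos (by simp [hj]), List.dropWhile_cons_of_pos (by simp [hj])]
      simp only [vec2codeRuns]
      simp [hj]

theorem runs_cons_low {i : Int} (hi : ¬ i ≥ 30) (rest : List Int) :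
    vec2codeRuns (i :: rest) = pvDigit i :: vec2codeRuns rest := by
  conv_rhs => rw [runs_fuse_low rest]
  simp only [vec2codeRuns]
  simp [hi]

theorem runs_cons_high {i : Int} (hi : i ≥ 30) (rest : List Int) :
    vec2codeRuns (i :: rest) = '$' :: pvDigit (i - 30) :: runsH rest := by
  simp only [vec2codeRuns, runsH]
  simp [hi]

theorem runsH_cons_high {i : Int} (hi : i ≥ 30) (rest : List Int) :
    runsH (i :: rest) = pvDigit (i - 30) :: runsH rest := by
  simp only [runsH]
  rw [List.takeWhile_cons_of_pos (by simp [hi]), List.dropWhile_cons_of_pos (by simp [hi])]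
  simp

theorem runsH_cons_low {i : Int} (hi : ¬ i ≥ 30) (rest : List Int) :
    runsH (i :: rest) = '$' :: vec2codeRuns (i :: rest) := by
  simp only [runsH]
  rw [List.takeWhile_cons_of_neg (by simp [hi]), List.dropWhile_cons_of_neg (by simp [hi])]
  simp

-- the loop invariant: A's loop in state hw = false produces B's remaining runs,
-- in state hw = true it produces the rest of the open high run (runsH).
theorem goA_runs (l : List Int) (hne : ∀ x ∈ l, x ≠ -1) (code : List Char) :
    vec2codeGo l false code = code ++ vec2codeRuns l ∧
    vec2codeGo l true code = code ++ runsH l := by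
  induction l generalizing code with
  | nil => simp [vec2codeGo, vec2codeRuns, runsH]
  | cons i rest ih =>
    have h : i ≠ -1 := hne i (by simp)
    have hrest : ∀ x ∈ rest, x ≠ -1 := fun x hx => hne x (by simp [hx])
    by_cases hi : i ≥ 30
    · constructor
      · simp only [vec2codeGo, if_neg h, if_pos hi, Bool.not_false, Bool.not_true,
          eq_self_iff_true, if_true, Bool.false_eq_true, if_false]
        rw [(ih hrest _).2, runs_cons_high hi]
        simp
      · simp only [vec2codeGo, if_neg h, if_pos hi, Bool.not_false, Bool.not_true,
          eq_self_iff_true, if_true, Bool.false_eq_true, if_false]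
        rw [(ih hrest _).2, runsH_cons_high hi]
        simp
    · constructor
      · simp only [vec2codeGo, if_neg h, if_neg hi, Bool.not_false, Bool.not_true,
          eq_self_iff_true, if_true, Bool.false_eq_true, if_false]
        rw [(ih hrest _).1, runs_cons_low hi]
        simp
      · simp only [vec2codeGo, if_neg h, if_neg hi, Bool.not_false, Bool.not_true,
          eq_self_iff_true, if_true, Bool.false_eq_true, if_false]
        rw [(ih hrest _).1, runsH_cons_low hi, runs_cons_low hi]
        simp

-- ===== VERDICT (by name: the statement is the Claim_ definition above) =====
theorem vec2code_spec : Claim_equal_vec2code := by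
  intro vec _ _
  unfold Spec_vec2code vec2code vec2code_alt pvPrefix
  rw [go_takeWhile]
  rw [(goA_runs _ (fun x hx => by simpa using List.mem_takeWhile_imp hx) []).1]
  simp
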